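-- pv_equiv track=rewrite | github.com/NguyenCatNguyen/Discrete-Structure | Assigment/Assigment5/Assigment5.py | check_function
-- ===== SOURCE A (Python) =====
-- def check_function(A,B,f):
--     count = 0
--     for x in A:
--         for y in B:
--             if (x,y) in f:
--                 count += 1
--     if count == len(A):
--         return True
--     else:
--         return False
-- ===== SOURCE B (Python) =====
-- def check_function(A, B, f):
--     count_A = {}
--     for x in A:
--         count_A[x] = count_A.get(x, 0) + 1
--     count_B = {}
--     for y in B:
--         count_B[y] = count_B.get(y, 0) + 1
--     count = 0
--     for (x, y) in set(f):
--         count += count_A.get(x, 0) * count_B.get(y, 0)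
--     return count == len(A)
-- ===== Notes on version B (the rewrite author's own statement) =====
-- stated objective: faster
-- what changed: Instead of scanning f for every pair of A x B, B builds multiplicity dictionaries for A and B in one pass each and sums count_A[x]*count_B[y] over the distinct pairs of f.
import Mathlib
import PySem

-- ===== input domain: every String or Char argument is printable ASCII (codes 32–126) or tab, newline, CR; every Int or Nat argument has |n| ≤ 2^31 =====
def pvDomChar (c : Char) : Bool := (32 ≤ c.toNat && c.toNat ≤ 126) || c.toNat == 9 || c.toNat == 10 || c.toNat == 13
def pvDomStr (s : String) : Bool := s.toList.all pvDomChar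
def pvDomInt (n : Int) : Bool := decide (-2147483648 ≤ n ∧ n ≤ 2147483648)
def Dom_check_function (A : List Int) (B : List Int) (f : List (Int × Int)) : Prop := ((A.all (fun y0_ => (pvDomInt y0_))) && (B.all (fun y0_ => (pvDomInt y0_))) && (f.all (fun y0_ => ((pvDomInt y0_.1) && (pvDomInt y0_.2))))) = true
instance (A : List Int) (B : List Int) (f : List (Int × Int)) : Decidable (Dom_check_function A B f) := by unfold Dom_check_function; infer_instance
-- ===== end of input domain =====

-- B replaces A's nested membership scan over A×B by one pass over the distinct pairs of f,
-- adding count_A[x]*count_B[y] from multiplicity dictionaries (objective: faster, asymptotic).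

-- ===== PORT A =====
-- literal port of A: nested loops over A and B, count += 1 when (x,y) in f
def check_function (A : List Int) (B : List Int) (f : List (Int × Int)) : Bool :=
  let count : Int := A.foldl (fun c x =>
    B.foldl (fun c y => if f.contains (x, y) then c + 1 else c) c) 0
  if count = (A.length : Int) then true else false

-- ===== PORT B =====
-- literal port of B: counting dicts for A and B, then one pass over set(f)
def check_function_alt (A : List Int) (B : List Int) (f : List (Int × Int)) : Bool :=
  let cA : PySem.Dict Int Int :=
    A.foldl (fun d x => d.insert x (d.getD x 0 + 1)) PySem.Dict.empty
  let cB : PySem.Dict Int Int :=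
    B.foldl (fun d y => d.insert y (d.getD y 0 + 1)) PySem.Dict.empty
  let count : Int := (PySem.Set.ofList f).foldl
    (fun c p => c + cA.getD p.1 0 * cB.getD p.2 0) 0
  decide (count = (A.length : Int))

-- ===== PRECONDITION & SPEC =====
def Spec_check_function (A : List Int) (B : List Int) (f : List (Int × Int)) (out : Bool) : Prop := out = check_function_alt A B f
instance (A : List Int) (B : List Int) (f : List (Int × Int)) (out : Bool) : Decidable (Spec_check_function A B f out) := by unfold Spec_check_function; infer_instance

-- ===== CLAIM (what is proved, stated in full; the proofs are below) =====
def Claim_equal_check_function : Prop := ∀ (A : List Int) (B : List Int) (f : List (Int × Int)), Dom_check_function A B f → Spec_check_function A B f (check_function A B f)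

-- ===== LEMMAS AND PROOFS =====

theorem pv_sum_map_add {α : Type} (l : List α) (g h : α → ℕ) :
    (l.map (fun x => g x + h x)).sum = (l.map g).sum + (l.map h).sum := by
  induction l with
  | nil => simp
  | cons a l ih => simp [ih]; omega

theorem pv_sum_indicator {α : Type} [DecidableEq α] (S : List α) (q : α)
    (hnd : S.Nodup) :
    (S.map (fun p => if p = q then 1 else 0)).sum = (if q ∈ S then 1 else 0 : ℕ) := by
  induction S with
  | nil => simp
  | cons a S ih =>
    simp only [List.nodup_cons] at hnd
    by_cases h : a = q
    · subst h
      simp [hnd.1, ih hnd.2]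
    · simp [h, Ne.symm h, ih hnd.2]

theorem pv_inner (a : Int) (B : List Int) (f S : List (Int × Int))
    (hnd : S.Nodup) (hm : ∀ p, p ∈ S ↔ p ∈ f) :
    B.countP (fun y => f.contains (a, y)) =
      (S.map (fun p => if p.1 = a then B.count p.2 else 0)).sum := by
  induction B with
  | nil => simp
  | cons b B ih =>
    rw [List.countP_cons]
    have hsplit : ∀ p : Int × Int,
        (if p.1 = a then (b :: B).count p.2 else 0) =
        (if p.1 = a then B.count p.2 else 0) + (if p = (a, b) then 1 else 0) := by
      intro p
      rcases p with ⟨p1, p2⟩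
      by_cases h1 : p1 = a
      · by_cases h2 : p2 = b
        · subst h1; subst h2; simp
        · simp [h1, h2, Ne.symm h2, Prod.ext_iff]
      · simp [h1, Prod.ext_iff]
    calc B.countP (fun y => f.contains (a, y)) + (if f.contains (a, b) then 1 else 0)
        = (S.map (fun p => if p.1 = a then B.count p.2 else 0)).sum
            + (S.map (fun p => if p = (a, b) then 1 else 0)).sum := by
          rw [ih, pv_sum_indicator S (a, b) hnd]
          congr 1
          have : (a, b) ∈ S ↔ f.contains (a, b) = true := by
            rw [hm, List.contains_iff_mem]
          by_cases hc : f.contains (a, b) = true <;> simp [this]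
      _ = (S.map (fun p => if p.1 = a then (b :: B).count p.2 else 0)).sum := by
          rw [← pv_sum_map_add]
          congr 1
          exact (List.map_congr_left (fun p _ => (hsplit p).symm))

theorem pv_outer (A B : List Int) (f S : List (Int × Int))
    (hnd : S.Nodup) (hm : ∀ p, p ∈ S ↔ p ∈ f) :
    (A.map (fun x => B.countP (fun y => f.contains (x, y)))).sum =
      (S.map (fun p => A.count p.1 * B.count p.2)).sum := by
  induction A with
  | nil => simp
  | cons a A ih =>
    have hsplit : ∀ p : Int × Int,
        (a :: A).count p.1 * B.count p.2 =
        A.count p.1 * B.count p.2 + (if p.1 = a then B.count p.2 else 0) := by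
      intro p
      by_cases h1 : p.1 = a
      · simp [h1, Nat.add_mul]
      · simp [h1, Ne.symm h1]
    calc (( a :: A).map (fun x => B.countP (fun y => f.contains (x, y)))).sum
        = B.countP (fun y => f.contains (a, y))
            + (A.map (fun x => B.countP (fun y => f.contains (x, y)))).sum := by simp
      _ = (S.map (fun p => A.count p.1 * B.count p.2)).sum
            + (S.map (fun p => if p.1 = a then B.count p.2 else 0)).sum := by
          rw [ih, pv_inner a B f S hnd hm]; omega
      _ = (S.map (fun p => (a :: A).count p.1 * B.count p.2)).sum := by
          rw [← pv_sum_map_add]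
          congr 1
          exact (List.map_congr_left (fun p _ => (hsplit p).symm))

theorem pv_counts_eq (A B : List Int) (f : List (Int × Int)) :
    (A.foldl (fun c x =>
      B.foldl (fun c y => if f.contains (x, y) then c + 1 else c) c) 0 : Int) =
    (PySem.Set.ofList f).foldl
      (fun c p => c + (A.foldl (fun d x => d.insert x (d.getD x 0 + 1)) PySem.Dict.empty).getD p.1 0
                    * (B.foldl (fun d y => d.insert y (d.getD y 0 + 1)) PySem.Dict.empty).getD p.2 0) 0 := by
  have h1 : ∀ (c : Int) (x : Int), x ∈ A →
      B.foldl (fun c y => if f.contains (x, y) then c + 1 else c) c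
      = c + ((B.countP (fun y => f.contains (x, y)) : ℕ) : Int) :=
    fun c x _ => PySem.List.foldl_if_add_one _ _ _
  have h2 : ∀ (c : Int) (p : Int × Int), p ∈ PySem.Set.ofList f →
      c + (A.foldl (fun d x => d.insert x (d.getD x 0 + 1)) PySem.Dict.empty).getD p.1 0
        * (B.foldl (fun d y => d.insert y (d.getD y 0 + 1)) PySem.Dict.empty).getD p.2 0
      = c + ((A.count p.1 : ℕ) : Int) * ((B.count p.2 : ℕ) : Int) := by
    intro c p _
    rw [PySem.Dict.getD_foldl_insert_add_one, PySem.Dict.getD_foldl_insert_add_one]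
    simp
  rw [PySem.List.foldl_congr_mem _ _ _ _ h1, PySem.List.foldl_congr_mem _ _ _ _ h2,
    PySem.List.foldl_add, PySem.List.foldl_add]
  have hnat := pv_outer A B f (PySem.Set.ofList f)
    (PySem.Set.nodup_ofList f) (fun p => PySem.Set.mem_ofList f p)
  have hL : (A.map (fun x => ((B.countP (fun y => f.contains (x, y)) : ℕ) : Int))).sum
      = (((A.map (fun x => B.countP (fun y => f.contains (x, y)))).sum : ℕ) : Int) := by
    rw [Nat.cast_list_sum, List.map_map]; rfl
  have hR : ((PySem.Set.ofList f).map
        (fun p => ((A.count p.1 : ℕ) : Int) * ((B.count p.2 : ℕ) : Int))).sum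
      = ((((PySem.Set.ofList f).map (fun p => A.count p.1 * B.count p.2)).sum : ℕ) : Int) := by
    simp [Nat.cast_list_sum, List.map_map, Function.comp_def]
  rw [hL, hR, hnat]

-- ===== VERDICT (by name: the statement is the Claim_ definition above) =====
theorem check_function_spec : Claim_equal_check_function := by
  intro A B f _
  unfold Spec_check_function check_function check_function_alt
  simp only []
  rw [pv_counts_eq A B f]
  by_cases h : (PySem.Set.ofList f).foldl
      (fun c p => c + (A.foldl (fun d x => d.insert x (d.getD x 0 + 1)) PySem.Dict.empty).getD p.1 0
                    * (B.foldl (fun d y => d.insert y (d.getD y 0 + 1)) PySem.Dict.empty).getD p.2 0) (0 : Int)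
      = (A.length : Int) <;> simp [h]
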